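-- pv_equiv track=rewrite | github.com/hwiskim/codetree | day1/nam_code.py | make_catcher_move_list
-- ===== SOURCE A (Python) =====
-- def make_catcher_move_list(n):
--
--     move_list = ['up', 'right', 'down', 'left']
--
--     catcher_trace =[]
--
--     m_idx = 0
--     replay_count = 1
--     two_count = 0
--
--     while True:
--
--         if two_count == 2:
--             two_count = 0
--             replay_count += 1
--
--         for _ in range(replay_count):
--             catcher_trace.append(move_list[m_idx])
--
--         if len(catcher_trace) >= n*n :
--             break
--
--         m_idx += 1
--         if m_idx == 4:
--             m_idx -= 4
--         two_count += 1
--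
--     return catcher_trace
-- ===== SOURCE B (Python) =====
-- def make_catcher_move_list(n):
--     # Builds the spiral run-length table [1,1,2,2,...,m-1,m-1,m] up front,
--     # then expands it in one pass over cycling directions.
--     # Intended difference: for n == 0 this returns [] (a spiral of n*n = 0
--     # moves), where A returns ['up'].
--     moves = ['up', 'right', 'down', 'left']
--     m = abs(n)
--     runs = [j for j in range(1, m) for _ in range(2)] + ([m] if m else [])
--     out = []
--     for i, r in enumerate(runs):
--         out += [moves[i % 4]] * r
--     return out
-- ===== Notes on version B (the rewrite author's own statement) =====
-- stated objective: alternative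
-- what changed: Replaces A's stateful while-loop (two_count/replay_count counters with a mid-loop break) by building the run-length table [1,1,2,2,...,m-1,m-1,m] up front and expanding it in one pass over cycling directions.
-- intended difference: For n == 0 A returns ['up'] (its loop appends one move before the length check), while B returns the empty list, the intended spiral of n*n = 0 moves. — e.g. on make_catcher_move_list(0): A returns ["up"], B returns []
import Mathlib
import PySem

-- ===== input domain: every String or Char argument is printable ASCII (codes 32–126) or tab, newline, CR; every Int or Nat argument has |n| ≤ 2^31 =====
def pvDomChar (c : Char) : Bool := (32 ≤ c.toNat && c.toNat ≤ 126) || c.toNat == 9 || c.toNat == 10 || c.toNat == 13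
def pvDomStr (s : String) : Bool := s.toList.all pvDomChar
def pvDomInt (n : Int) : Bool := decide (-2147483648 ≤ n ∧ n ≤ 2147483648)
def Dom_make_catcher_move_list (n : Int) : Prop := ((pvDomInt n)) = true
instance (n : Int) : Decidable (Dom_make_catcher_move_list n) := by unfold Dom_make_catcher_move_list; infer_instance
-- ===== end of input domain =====

-- B replaces A's stateful while-loop (two_count/replay_count counters and a
-- mid-loop break) with a precomputed run-length table expanded in one pass;
-- for n = 0 B intentionally returns [] where A returns ["up"] (see D_ below).

-- ===== PORT A =====
-- A's while-loop, made total with a fuel counter (never exhausted: the loop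
-- runs at most 2*|n|-1 times, see the proofs below).
def mclA_moves : List String := ["up", "right", "down", "left"]

def mclA_loop (fuel : Nat) (trace : List String) (m_idx replay_count two_count : Nat) (n : Int) : List String :=
  match fuel with
  | 0 => trace
  | fuel + 1 =>
    let (two_count, replay_count) :=
      if two_count = 2 then (0, replay_count + 1) else (two_count, replay_count)
    -- for _ in range(replay_count): catcher_trace.append(move_list[m_idx])
    -- (m_idx is always 0..3, so plain getD matches Python's indexing here)
    let trace := (List.range replay_count).foldl (fun t _ => t ++ [mclA_moves.getD m_idx ""]) trace
    if (trace.length : Int) ≥ n * n then trace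
    else
      let m_idx := m_idx + 1
      let m_idx := if m_idx = 4 then m_idx - 4 else m_idx
      mclA_loop fuel trace m_idx replay_count (two_count + 1) n

def make_catcher_move_list (n : Int) : List String :=
  mclA_loop (n.natAbs * n.natAbs + 1) [] 0 1 0 n

-- ===== PORT B =====
def mclB_moves : List String := ["up", "right", "down", "left"]

-- runs = [j for j in range(1, m) for _ in range(2)] + ([m] if m else [])
def mclB_runs (m : Nat) : List Int :=
  (PySem.List.pyRange 1 (m : Int) 1).flatMap (fun j => [j, j]) ++
    (if m = 0 then [] else [(m : Int)])

def make_catcher_move_list_alt (n : Int) : List String :=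
  let m : Nat := n.natAbs
  (PySem.List.enumerate (mclB_runs m) 0).foldl
    (fun out p => out ++ List.replicate p.2.toNat (PySem.List.pyGetD mclB_moves (PySem.Int.mod p.1 4) "")) []

-- ===== PRECONDITION & SPEC =====
-- For n = 0 A returns ["up"] (its loop appends one move before checking the
-- length against n*n = 0), while B returns [], the intended spiral of 0 moves.
def D_make_catcher_move_list (n : Int) : Prop := n = 0
instance (n : Int) : Decidable (D_make_catcher_move_list n) := by
  unfold D_make_catcher_move_list; infer_instance

def Spec_make_catcher_move_list (n : Int) (out : List String) : Prop :=
  ¬ D_make_catcher_move_list n → out = make_catcher_move_list_alt n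
instance (n : Int) (out : List String) : Decidable (Spec_make_catcher_move_list n out) := by
  unfold Spec_make_catcher_move_list; infer_instance

def pvDiffWitness_make_catcher_move_list : Int := 0
def pvDiffWitnessOut_make_catcher_move_list : (List String) × (List String) := (["up"], [])

-- ===== CLAIM (what is proved, stated in full; the proofs are below) =====
def Claim_unchanged_make_catcher_move_list : Prop :=
  ∀ (n : Int), Dom_make_catcher_move_list n → Spec_make_catcher_move_list n (make_catcher_move_list n)
def Claim_changed_make_catcher_move_list : Prop :=
  Dom_make_catcher_move_list (pvDiffWitness_make_catcher_move_list) ∧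
  D_make_catcher_move_list (pvDiffWitness_make_catcher_move_list) ∧
  make_catcher_move_list (pvDiffWitness_make_catcher_move_list) = pvDiffWitnessOut_make_catcher_move_list.1 ∧
  make_catcher_move_list_alt (pvDiffWitness_make_catcher_move_list) = pvDiffWitnessOut_make_catcher_move_list.2 ∧
  pvDiffWitnessOut_make_catcher_move_list.1 ≠ pvDiffWitnessOut_make_catcher_move_list.2
def Claim_exact_make_catcher_move_list : Prop :=
  ∀ (n : Int), Dom_make_catcher_move_list n → D_make_catcher_move_list n →
    make_catcher_move_list n ≠ make_catcher_move_list_alt n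

-- ===== LEMMAS AND PROOFS =====

-- direction of the t-th run
def dirOf (t : Nat) : String := mclA_moves.getD (t % 4) ""

-- reference spiral: d runs remaining, starting at run index j
def G : Nat → Nat → List String
  | 0, _ => []
  | d + 1, j => List.replicate (j / 2 + 1) (dirOf j) ++ G d (j + 1)

-- total trace length after j runs
def S (j : Nat) : Nat := if j % 2 = 0 then (j/2) * (j/2) + j/2 else (j/2+1) * (j/2+1)

-- A's loop state (replay_count, two_count) at the TOP of iteration j
def preR (j : Nat) : Nat := if j = 0 then 1 else (j-1)/2 + 1
def preT (j : Nat) : Nat := if j = 0 then 0 else (if (j-1) % 2 = 0 then 1 else 2)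
def twoPost (j : Nat) : Nat := if j % 2 = 1 then 1 else 0

lemma S_succ (j : Nat) : S (j+1) = S j + (j/2 + 1) := by
  rcases Nat.even_or_odd j with ⟨k, hk⟩ | ⟨k, hk⟩ <;> subst hk
  · have h1 : (k+k) % 2 = 0 := by omega
    have h2 : (k+k+1) % 2 = 1 := by omega
    have h3 : (k+k)/2 = k := by omega
    have h4 : (k+k+1)/2 = k := by omega
    simp [S, h1, h2, h3, h4]; try ring
  · have h2 : (2*k+1) % 2 = 1 := by omega
    have h1 : (2*k+1+1) % 2 = 0 := by omega
    have h3 : (2*k+1)/2 = k := by omega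
    have h4 : (2*k+1+1)/2 = k+1 := by omega
    simp [S, h1, h2, h3, h4]; try ring

lemma S_lt (j m : Nat) (hm : 1 ≤ m) (hj : j < 2*m - 1) : S j < m * m := by
  rcases Nat.even_or_odd j with ⟨k, hk⟩ | ⟨k, hk⟩ <;> subst hk
  · have h1 : (k+k) % 2 = 0 := by omega
    have h3 : (k+k)/2 = k := by omega
    have hk' : k + 1 ≤ m := by omega
    simp [S, h1, h3]; nlinarith
  · have h2 : (2*k+1) % 2 = 1 := by omega
    have h3 : (2*k+1)/2 = k := by omega
    have hk' : k + 1 < m := by omega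
    simp [S, h2, h3]; nlinarith

lemma S_top (m : Nat) (hm : 1 ≤ m) : S (2*m - 1) = m * m := by
  have h2 : (2*m-1) % 2 = 1 := by omega
  have h3 : (2*m-1)/2 + 1 = m := by omega
  simp [S, h2, h3]

lemma step_pair (j : Nat) :
    (if preT j = 2 then ((0:Nat), preR j + 1) else (preT j, preR j)) = (twoPost j, j/2 + 1) := by
  unfold preT preR twoPost
  split_ifs <;> simp_all [Prod.ext_iff] <;> omega

lemma preT_succ (j : Nat) : twoPost j + 1 = preT (j+1) := by
  unfold twoPost preT; split_ifs <;> omega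

lemma preR_succ (j : Nat) : j/2 + 1 = preR (j+1) := by
  simp [preR]

lemma midx_succ (j : Nat) :
    (if (j % 4) + 1 = 4 then (j % 4) + 1 - 4 else (j % 4) + 1) = (j+1) % 4 := by
  split_ifs <;> omega

lemma foldl_range_append (k : Nat) (t : List String) (x : String) :
    (List.range k).foldl (fun t _ => t ++ [x]) t = t ++ List.replicate k x := by
  induction k generalizing t with
  | zero => simp
  | succ k ih =>
    rw [List.range_succ, List.foldl_append, ih]
    simp [List.replicate_succ']

lemma loopA_eq (n : Int) (m : Nat) (hm : m = n.natAbs) (hm1 : 1 ≤ m) :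
    ∀ (d : Nat), 1 ≤ d → ∀ (j fuel : Nat) (trace : List String),
      d + j = 2*m - 1 → d ≤ fuel → trace.length = S j →
      mclA_loop fuel trace (j % 4) (preR j) (preT j) n = trace ++ G d j := by
  have hcast : ((m*m : Nat) : Int) = n * n := by
    rw [hm]; exact_mod_cast Int.natAbs_mul_self
  intro d
  induction d with
  | zero => intro h; omega
  | succ d ih =>
    intro _ j fuel trace hdj hfuel hlen
    obtain ⟨f, rfl⟩ : ∃ f, fuel = f + 1 := ⟨fuel - 1, by omega⟩
    rw [mclA_loop]
    rw [step_pair]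
    dsimp only
    rw [foldl_range_append]
    have hlen' : (trace ++ List.replicate (j/2+1) (mclA_moves.getD (j % 4) "")).length = S (j+1) := by
      simp [hlen, S_succ]
    rcases Nat.eq_zero_or_pos d with rfl | hd
    · -- last iteration: j = 2m-2, the length reaches m*m and the loop breaks
      have hj : j = 2*m - 2 := by omega
      have hge : ((trace ++ List.replicate (j/2+1) (mclA_moves.getD (j % 4) "")).length : Int) ≥ n * n := by
        rw [hlen', ← hcast]
        have : S (j+1) = m * m := by rw [hj, show 2*m-2+1 = 2*m-1 by omega, S_top m hm1]
        simp [this]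
      rw [if_pos hge]
      simp [G, dirOf, List.getD]
    · -- not the last iteration: the length is still below m*m, recurse
      have hlt : S (j+1) < m * m := S_lt (j+1) m hm1 (by omega)
      have hngo : ¬ ((trace ++ List.replicate (j/2+1) (mclA_moves.getD (j % 4) "")).length : Int) ≥ n * n := by
        rw [hlen', ← hcast]
        simp
        exact_mod_cast hlt
      rw [if_neg hngo]
      rw [midx_succ, preT_succ]
      rw [preR_succ] at hlen' ⊢
      rw [ih hd (j+1) f _ (by omega) (by omega) hlen']
      rw [show d + 1 = Nat.succ d from rfl, G]
      simp [← preR_succ, dirOf, List.getD]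

lemma A_eq_G (n : Int) (m : Nat) (hm : m = n.natAbs) (hm1 : 1 ≤ m) :
    make_catcher_move_list n = G (2*m - 1) 0 := by
  have h := loopA_eq n m hm hm1 (2*m-1) (by omega) 0 (n.natAbs * n.natAbs + 1) []
    (by omega) (by rw [← hm]; have h2 : 2*m ≤ m*m + 1 := (by zify; nlinarith [sq_nonneg ((m:ℤ) - 1)]); omega) (by simp [S])
  simpa [make_catcher_move_list, preR, preT] using h

-- B-side: the run table is [1,1,2,2,...,m-1,m-1,m] = map (t/2+1) over range (2m-1)
lemma doubled_eq (k : Nat) :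
    (PySem.List.pyRange 1 ((k : Int) + 1) 1).flatMap (fun j => [j, j]) =
      (List.range (2*k)).map (fun t => ((t/2 + 1 : Nat) : Int)) := by
  induction k with
  | zero => simp [PySem.List.pyRange_one_eq_nil]
  | succ k ih =>
    have hc : ((k+1:Nat):Int) + 1 = ((k:Int) + 1) + 1 := by push_cast; ring
    rw [hc, PySem.List.pyRange_one_succ_right (by omega : (1:Int) ≤ (k:Int) + 1)]
    rw [List.flatMap_append, ih]
    have h1 : 2*(k+1) = (2*k + 1) + 1 := by omega
    rw [h1, List.range_succ, List.range_succ]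
    simp [List.map_append]
    ring_nf
    omega

lemma runsB_eq (m : Nat) (hm : 1 ≤ m) :
    mclB_runs m = (List.range (2*m - 1)).map (fun t => ((t/2 + 1 : Nat) : Int)) := by
  obtain ⟨k, rfl⟩ : ∃ k, m = k + 1 := ⟨m - 1, by omega⟩
  unfold mclB_runs
  rw [show ((k+1 : Nat) : Int) = (k : Int) + 1 by push_cast; ring, doubled_eq]
  have h1 : 2*(k+1) - 1 = 2*k + 1 := by omega
  rw [h1, List.range_succ, List.map_append]
  simp

lemma key_flatMap (d : Nat) : ∀ (j : Nat),
    (PySem.List.enumerate ((List.range' j d).map (fun t => ((t/2 + 1 : Nat) : Int))) (j : Int)).flatMap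
      (fun p => List.replicate p.2.toNat (PySem.List.pyGetD mclB_moves (PySem.Int.mod p.1 4) "")) = G d j := by
  induction d with
  | zero => intro j; simp [G, PySem.List.enumerate_nil]
  | succ d ih =>
    intro j
    rw [List.range'_succ, List.map_cons, PySem.List.enumerate_cons, List.flatMap_cons]
    have hmod : PySem.Int.mod ((j : Nat) : Int) 4 = ((j % 4 : Nat) : Int) := by
      exact_mod_cast PySem.Int.mod_natCast j 4
    have hget : PySem.List.pyGetD mclB_moves ((j % 4 : Nat) : Int) "" = dirOf j := by
      rw [PySem.List.pyGetD_natCast]; rfl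
    have hcast : (j : Int) + 1 = ((j + 1 : Nat) : Int) := by push_cast; ring
    rw [hcast, ih (j+1)]
    rw [show d + 1 = Nat.succ d from rfl, G]
    dsimp only
    rw [hmod, hget]
    simp only [Int.toNat_natCast]

lemma B_eq_G (n : Int) (m : Nat) (hm : m = n.natAbs) (hm1 : 1 ≤ m) :
    make_catcher_move_list_alt n = G (2*m - 1) 0 := by
  unfold make_catcher_move_list_alt
  rw [PySem.List.foldl_append_eq_flatMap]
  rw [← hm, runsB_eq m hm1, List.range_eq_range']
  simpa using key_flatMap (2*m - 1) 0

-- ===== VERDICT (by name: the statement is the Claim_ definition above) =====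
theorem make_catcher_move_list_spec : Claim_unchanged_make_catcher_move_list := by
  intro n _ hD
  have hn : n ≠ 0 := hD
  have hm1 : 1 ≤ n.natAbs := by
    rcases Nat.eq_zero_or_pos n.natAbs with h | h
    · exact absurd (Int.natAbs_eq_zero.mp h) hn
    · exact h
  rw [A_eq_G n n.natAbs rfl hm1, B_eq_G n n.natAbs rfl hm1]

theorem make_catcher_move_list_changed : Claim_changed_make_catcher_move_list := by
  unfold Claim_changed_make_catcher_move_list; decide

theorem make_catcher_move_list_tight : Claim_exact_make_catcher_move_list := by
  intro n _ hD
  subst hD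
  decide
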